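-- pv_equiv track=rewrite | github.com/fabfo278/transcriber | transcriber.py | preview_file
-- ===== SOURCE A (Python) =====
-- def preview_file(lines, max_preview=8):
--     """Erste Zeile jedes Absatzes (getrennt durch Leerzeilen)."""
--     preview_lines = []
--     blank_pending = False
--     for i, line in enumerate(lines, 1):
--         stripped = line.rstrip("\n")
--         if stripped == "":
--             blank_pending = True
--         else:
--             if blank_pending or not preview_lines:
--                 preview_lines.append((i, stripped))
--                 blank_pending = False
--             if len(preview_lines) >= max_preview:
--                 break
--     return preview_lines
-- ===== SOURCE B (Python) =====
-- def preview_file(lines, max_preview=8):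
--     """Erste Zeile jedes Absatzes (getrennt durch Leerzeilen)."""
--     stripped = [line.rstrip("\n") for line in lines]
--     heads = [(i, s) for (i, s), prev in zip(enumerate(stripped, 1), [""] + stripped)
--              if s != "" and prev == ""]
--     return heads[:max(max_preview, 0)]
-- ===== Notes on version B (the rewrite author's own statement) =====
-- stated objective: simpler
-- what changed: Replaces A's stateful flag-machine loop with early break by a declarative pipeline: strip all lines, detect paragraph heads by zipping each line with its predecessor (head = non-blank line whose predecessor is blank or absent), then slice off the first max_preview heads.
-- intended difference: For max_preview <= 0 with at least one non-blank line, A's append-before-check loop still returns the first paragraph head, while B returns [], the intended empty preview for a nonpositive cap. — e.g. on preview_file(["a"], 0): A returns [(1, "a")], B returns []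
import Mathlib
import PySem

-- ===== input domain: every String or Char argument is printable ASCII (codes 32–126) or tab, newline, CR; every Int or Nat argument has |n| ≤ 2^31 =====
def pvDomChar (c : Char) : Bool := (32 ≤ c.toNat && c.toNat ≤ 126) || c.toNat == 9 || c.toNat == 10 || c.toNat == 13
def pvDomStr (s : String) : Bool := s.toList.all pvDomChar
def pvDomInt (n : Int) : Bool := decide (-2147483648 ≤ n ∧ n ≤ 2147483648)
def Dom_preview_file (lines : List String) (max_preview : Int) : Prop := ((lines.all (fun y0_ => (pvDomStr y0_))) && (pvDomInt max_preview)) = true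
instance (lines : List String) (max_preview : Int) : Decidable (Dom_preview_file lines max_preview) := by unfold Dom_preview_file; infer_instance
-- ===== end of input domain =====

-- B replaces A's stateful flag-machine loop by a declarative pipeline (strip all, zip each
-- line with its predecessor to pick paragraph heads, slice); objective: simpler.
-- Intended difference (D_ below): for max_preview ≤ 0 A still returns the first head, B returns [].

-- s.rstrip("\n"): hand port (PySem has no rstrip-with-chars); exact — drops trailing '\n' only.
def pvRstripNl (s : String) : String :=
  String.ofList ((s.toList.reverse.dropWhile (fun c => c == '\n')).reverse)

-- ===== PORT A =====
def previewA : List String → Int → Int → Bool → List (Int × String) → List (Int × String)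
  | [], _, _, _, acc => acc
  | line :: rest, i, m, bp, acc =>
    let stripped := pvRstripNl line
    if stripped = "" then
      previewA rest (i + 1) m true acc
    else
      if bp || acc.isEmpty then
        let acc' := acc ++ [(i, stripped)]
        if (acc'.length : Int) ≥ m then acc' else previewA rest (i + 1) m false acc'
      else
        if (acc.length : Int) ≥ m then acc else previewA rest (i + 1) m bp acc

def preview_file (lines : List String) (max_preview : Int) : List (Int × String) :=
  previewA lines 1 max_preview false []

-- ===== PORT B =====
def preview_file_alt (lines : List String) (max_preview : Int) : List (Int × String) :=
  let stripped := lines.map pvRstripNl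
  let heads := ((PySem.List.enumerate stripped 1).zip ("" :: stripped)).filterMap
      (fun p => if p.1.2 ≠ "" ∧ p.2 = "" then some p.1 else none)
  PySem.List.slice heads none (some (max max_preview 0))

-- ===== PRECONDITION & SPEC =====
-- For max_preview ≤ 0 with at least one non-blank line, A's append-before-check loop still
-- returns the first paragraph head, while B returns [], the intended empty preview for a
-- nonpositive cap.  (A line is non-blank after rstrip("\n") iff it has a char other than '\n'.)
def D_preview_file (lines : List String) (max_preview : Int) : Prop :=
  max_preview ≤ 0 ∧ (lines.any (fun s => s.toList.any (fun c => !(c == '\n')))) = true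
instance (lines : List String) (max_preview : Int) : Decidable (D_preview_file lines max_preview) := by unfold D_preview_file; infer_instance

def Spec_preview_file (lines : List String) (max_preview : Int) (out : List (Int × String)) : Prop := ¬ D_preview_file lines max_preview → out = preview_file_alt lines max_preview
instance (lines : List String) (max_preview : Int) (out : List (Int × String)) : Decidable (Spec_preview_file lines max_preview out) := by unfold Spec_preview_file; infer_instance

def pvDiffWitness_preview_file : List String × Int := (["a"], 0)
def pvDiffWitnessOut_preview_file : (List (Int × String)) × (List (Int × String)) := ([(1, "a")], [])

-- ===== CLAIM (what is proved, stated in full; the proofs are below) =====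
def Claim_unchanged_preview_file : Prop := ∀ (lines : List String) (max_preview : Int), Dom_preview_file lines max_preview → Spec_preview_file lines max_preview (preview_file lines max_preview)
def Claim_changed_preview_file : Prop := Dom_preview_file (pvDiffWitness_preview_file.1) (pvDiffWitness_preview_file.2) ∧ D_preview_file (pvDiffWitness_preview_file.1) (pvDiffWitness_preview_file.2) ∧ preview_file (pvDiffWitness_preview_file.1) (pvDiffWitness_preview_file.2) = pvDiffWitnessOut_preview_file.1 ∧ preview_file_alt (pvDiffWitness_preview_file.1) (pvDiffWitness_preview_file.2) = pvDiffWitnessOut_preview_file.2 ∧ pvDiffWitnessOut_preview_file.1 ≠ pvDiffWitnessOut_preview_file.2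
def Claim_exact_preview_file : Prop := ∀ (lines : List String) (max_preview : Int), Dom_preview_file lines max_preview → D_preview_file lines max_preview → preview_file lines max_preview ≠ preview_file_alt lines max_preview

-- ===== LEMMAS AND PROOFS =====

-- proof-only recursive characterisation of B's zip/filter head selection
def headsFrom : List String → Int → Bool → List (Int × String)
  | [], _, _ => []
  | s :: r, i, pb =>
    if s = "" then headsFrom r (i + 1) true
    else if pb then (i, s) :: headsFrom r (i + 1) false else headsFrom r (i + 1) false

theorem filterZip_eq_headsFrom : ∀ (xs : List String) (i : Int) (prev : String),
    ((PySem.List.enumerate xs i).zip (prev :: xs)).filterMap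
        (fun p => if p.1.2 ≠ "" ∧ p.2 = "" then some p.1 else none)
      = headsFrom xs i (prev = "") := by
  intro xs
  induction xs with
  | nil => intro i prev; simp [PySem.List.enumerate_nil, headsFrom]
  | cons x r ih =>
    intro i prev
    rw [PySem.List.enumerate_cons]
    simp only [List.zip_cons_cons, List.filterMap_cons]
    by_cases hx : x = "" <;> by_cases hp : prev = "" <;>
      simp [headsFrom, hx, hp, ih (i + 1) x]

theorem pvRstripNl_eq_empty_iff (s : String) :
    pvRstripNl s = "" ↔ ∀ c ∈ s.toList, c = '\n' := by
  unfold pvRstripNl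
  constructor
  · intro h c hc
    have h2 : (s.toList.reverse.dropWhile (fun c => c == '\n')).reverse = [] := by
      have := congrArg String.toList h
      simpa [String.toList_ofList] using this
    rw [List.reverse_eq_nil_iff, List.dropWhile_eq_nil_iff] at h2
    have := h2 c (by simpa using hc)
    simpa using this
  · intro h
    have h2 : s.toList.reverse.dropWhile (fun c => c == '\n') = [] := by
      rw [List.dropWhile_eq_nil_iff]
      intro c hc
      simp [h c (by simpa using hc)]
    simp [h2]

theorem previewA_invariant : ∀ (xs : List String) (i m : Int) (bp : Bool) (acc : List (Int × String)),
    (acc.length : Int) < m →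
    previewA xs i m bp acc
      = acc ++ (headsFrom (xs.map pvRstripNl) i (bp || acc.isEmpty)).take (m - acc.length).toNat := by
  intro xs
  induction xs with
  | nil => intro i m bp acc _; simp [previewA, headsFrom]
  | cons x r ih =>
    intro i m bp acc hlt
    by_cases hx : pvRstripNl x = ""
    · have hA : previewA (x :: r) i m bp acc = previewA r (i + 1) m true acc := by
        simp [previewA, hx]
      rw [hA, ih (i + 1) m true acc hlt]
      simp [headsFrom, hx]
    · by_cases hc : (bp || acc.isEmpty) = true
      · -- boundary: this line is a paragraph head
        by_cases hm : ((acc ++ [(i, pvRstripNl x)]).length : Int) ≥ m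
        · have hA : previewA (x :: r) i m bp acc = acc ++ [(i, pvRstripNl x)] := by
            simp only [previewA, if_neg hx, hc, if_true]
            rw [if_pos hm]
          rw [hA]
          have h1 : (m - (acc.length : Int)).toNat = 1 := by
            simp at hm; omega
          simp [headsFrom, hx, hc, h1]
        · have hA : previewA (x :: r) i m bp acc
              = previewA r (i + 1) m false (acc ++ [(i, pvRstripNl x)]) := by
            simp only [previewA, if_neg hx, hc, if_true, if_neg hm]
          push_neg at hm
          rw [hA, ih (i + 1) m false (acc ++ [(i, pvRstripNl x)]) (by simpa using hm)]
          have htk : (m - (acc.length : Int)).toNat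
              = (m - ((acc ++ [(i, pvRstripNl x)]).length : Int)).toNat + 1 := by
            simp; omega
          have he : (acc ++ [(i, pvRstripNl x)]).isEmpty = false := by simp
          simp [headsFrom, hx, hc, htk, List.take_succ_cons, he]
      · -- mid-paragraph: bp = false and acc nonempty
        have hA : previewA (x :: r) i m bp acc = previewA r (i + 1) m bp acc := by
          have : ¬ ((acc.length : Int) ≥ m) := by omega
          simp [previewA, hx, hc, this]
        have hbp : bp = false := by
          cases bp with
          | false => rfl
          | true => simp at hc
        rw [hA, hbp, ih (i + 1) m false acc hlt]
        simp only [Bool.or_eq_true] at hc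
        push_neg at hc
        have hacc : acc.isEmpty = false := by
          cases h : acc.isEmpty
          · rfl
          · exact absurd h hc.2
        simp [headsFrom, hx, hacc]

theorem previewA_allBlank : ∀ (xs : List String), (∀ s ∈ xs, pvRstripNl s = "") →
    ∀ (i m : Int) (bp : Bool) (acc : List (Int × String)), previewA xs i m bp acc = acc := by
  intro xs
  induction xs with
  | nil => intro _ i m bp acc; simp [previewA]
  | cons x r ih =>
    intro h i m bp acc
    have hx : pvRstripNl x = "" := h x (by simp)
    simp only [previewA, if_pos hx]
    exact ih (fun s hs => h s (by simp [hs])) _ _ _ _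

theorem previewA_prefix : ∀ (xs : List String) (i m : Int) (bp : Bool) (acc : List (Int × String)),
    ∃ t, previewA xs i m bp acc = acc ++ t := by
  intro xs
  induction xs with
  | nil => intro i m bp acc; exact ⟨[], by simp [previewA]⟩
  | cons x r ih =>
    intro i m bp acc
    by_cases hx : pvRstripNl x = ""
    · simpa [previewA, hx] using ih (i + 1) m true acc
    · by_cases hc : (bp || acc.isEmpty) = true
      · by_cases hm : ((acc ++ [(i, pvRstripNl x)]).length : Int) ≥ m
        · refine ⟨[(i, pvRstripNl x)], ?_⟩
          simp only [previewA, if_neg hx, hc, if_true]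
          rw [if_pos hm]
        · obtain ⟨t, ht⟩ := ih (i + 1) m false (acc ++ [(i, pvRstripNl x)])
          exact ⟨(i, pvRstripNl x) :: t, by simp only [previewA, if_neg hx, hc, if_true, if_neg hm, ht]; simp⟩
      · by_cases hm : ((acc.length : Int) ≥ m)
        · exact ⟨[], by simp [previewA, hx, hc, hm]⟩
        · simpa [previewA, hx, hc, hm] using ih (i + 1) m bp acc

theorem previewA_ne_nil : ∀ (xs : List String), (∃ s ∈ xs, pvRstripNl s ≠ "") →
    ∀ (i m : Int) (bp : Bool), previewA xs i m bp [] ≠ [] := by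
  intro xs
  induction xs with
  | nil => intro h; simp at h
  | cons x r ih =>
    intro h i m bp
    by_cases hx : pvRstripNl x = ""
    · have hr : ∃ s ∈ r, pvRstripNl s ≠ "" := by
        rcases h with ⟨s, hs, hne⟩
        rcases List.mem_cons.mp hs with rfl | hsr
        · exact absurd hx hne
        · exact ⟨s, hsr, hne⟩
      simpa [previewA, hx] using ih hr (i + 1) m true
    · by_cases hm : (([(i, pvRstripNl x)] : List (Int × String)).length : Int) ≥ m
      · simp only [previewA, if_neg hx, Bool.or_true, List.isEmpty_nil, if_true, List.nil_append]
        rw [if_pos (by simpa using hm)]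
        simp
      · obtain ⟨t, ht⟩ := previewA_prefix r (i + 1) m false [(i, pvRstripNl x)]
        simp only [previewA, if_neg hx, Bool.or_true, List.isEmpty_nil, if_true, List.nil_append]
        rw [if_neg (by simpa using hm), ht]
        simp

-- ===== VERDICT (by name: the statements are the Claim_ definitions above) =====
theorem preview_file_spec : Claim_unchanged_preview_file := by
  intro lines max_preview _ hD
  unfold preview_file preview_file_alt
  dsimp only
  rw [filterZip_eq_headsFrom]
  unfold D_preview_file at hD
  push Not at hD
  by_cases hm : 1 ≤ max_preview
  · have hmax : max max_preview 0 = max_preview := by omega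
    rw [hmax, PySem.List.slice_to _ (by omega)]
    have := previewA_invariant lines 1 max_preview false [] (by simpa using hm)
    simpa using this
  · have hall : ∀ s ∈ lines, pvRstripNl s = "" := by
      have hb := hD (by omega)
      intro s hs
      rw [pvRstripNl_eq_empty_iff]
      intro c hc
      by_contra hne
      exact hb (List.any_eq_true.mpr ⟨s, hs, List.any_eq_true.mpr ⟨c, hc, by simp [hne]⟩⟩)
    rw [previewA_allBlank lines hall]
    have hmax : max max_preview 0 = 0 := by omega
    rw [hmax, PySem.List.slice_to _ (by omega)]
    simp

theorem preview_file_changed : Claim_changed_preview_file := by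
  unfold Claim_changed_preview_file; decide

theorem preview_file_tight : Claim_exact_preview_file := by
  intro lines max_preview _ hD
  obtain ⟨hm, hany⟩ := hD
  have hB : preview_file_alt lines max_preview = [] := by
    unfold preview_file_alt
    dsimp only
    have hmax : max max_preview 0 = 0 := by omega
    rw [hmax, PySem.List.slice_to _ (by omega)]
    simp
  rw [hB]
  unfold preview_file
  apply previewA_ne_nil
  simp only [List.any_eq_true] at hany
  rcases hany with ⟨s, hs, c, hc, hne⟩
  refine ⟨s, hs, fun h => ?_⟩
  have := (pvRstripNl_eq_empty_iff s).mp h c hc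
  exact absurd this (by simpa using hne)
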